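-- pv_equiv track=rewrite | github.com/sophie006liu/singlePDBFormatter | singlePDBTable2.py | getPDBChainList
-- ===== SOURCE A (Python) =====
-- def getPDBChainList(pdb_lines):
--   pdb_chain_list = []
--   start = 0
--   end = -1
--
--   for i in range(len(pdb_lines)): #iterate through lines of PDB string list
--     line = pdb_lines[i]
--     if "TER" in line: #need to start new chain
--       end = i
--       pdb_chain_list.append(pdb_lines[start:end]) #chain list does not include TER
--       start = i + 1
--
--   return pdb_chain_list
-- ===== SOURCE B (Python) =====
-- def getPDBChainList(pdb_lines):
--     chains = []
--     current = []
--     for line in pdb_lines: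
--         if "TER" in line:
--             chains.append(current)
--             current = []
--         else:
--             current.append(line)
--     return chains
-- ===== Notes on version B (the rewrite author's own statement) =====
-- stated objective: idiomatic
-- what changed: B accumulates each chain in a running buffer that is flushed at every TER line, instead of A's start/end index bookkeeping with repeated slicing of the original list.
import Mathlib
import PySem

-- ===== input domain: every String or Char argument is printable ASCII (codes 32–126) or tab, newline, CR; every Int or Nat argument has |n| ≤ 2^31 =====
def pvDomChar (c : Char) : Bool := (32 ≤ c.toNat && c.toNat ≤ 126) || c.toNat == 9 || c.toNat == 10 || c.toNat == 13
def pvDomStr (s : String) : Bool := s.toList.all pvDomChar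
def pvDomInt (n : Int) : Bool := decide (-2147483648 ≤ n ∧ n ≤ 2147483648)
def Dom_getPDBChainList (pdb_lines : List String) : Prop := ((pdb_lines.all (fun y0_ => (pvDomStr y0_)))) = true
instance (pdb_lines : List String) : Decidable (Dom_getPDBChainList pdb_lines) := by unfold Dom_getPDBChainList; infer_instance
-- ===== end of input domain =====

-- B replaces A's start/end index bookkeeping + slicing by a running chain buffer flushed at each TER line (idiomatic).

-- ===== PORT A =====
-- state: (pdb_chain_list, start, end); loop over i in range(len(pdb_lines))
def getPDBChainList (pdb_lines : List String) : List (List String) :=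
  let st :=
    (List.range pdb_lines.length).foldl
      (fun (s : List (List String) × Int × Int) (i : Nat) =>
        let line := PySem.List.pyGetD pdb_lines (i : Int) ""
        if PySem.Str.isIn "TER" line then
          let e := (i : Int)
          (s.1 ++ [PySem.List.slice pdb_lines (some s.2.1) (some e)], e + 1, e)
        else s)
      ([], 0, -1)
  st.1

-- ===== PORT B =====
-- state: (chains, current buffer)
def getPDBChainList_alt (pdb_lines : List String) : List (List String) :=
  let st :=
    pdb_lines.foldl
      (fun (s : List (List String) × List String) line =>
        if PySem.Str.isIn "TER" line then (s.1 ++ [s.2], [])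
        else (s.1, s.2 ++ [line]))
      ([], [])
  st.1

-- ===== PRECONDITION & SPEC =====
def Spec_getPDBChainList (pdb_lines : List String) (out : List (List String)) : Prop := out = getPDBChainList_alt pdb_lines
instance (pdb_lines : List String) (out : List (List String)) : Decidable (Spec_getPDBChainList pdb_lines out) := by unfold Spec_getPDBChainList; infer_instance

-- ===== CLAIM (what is proved, stated in full; the proofs are below) =====
def Claim_equal_getPDBChainList : Prop := ∀ (pdb_lines : List String), Dom_getPDBChainList pdb_lines → Spec_getPDBChainList pdb_lines (getPDBChainList pdb_lines)

-- ===== LEMMAS AND PROOFS =====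

-- A's step function, abstracted over the full input list
def stepA (xs : List String) (s : List (List String) × Int × Int) (i : Nat) :
    List (List String) × Int × Int :=
  let line := PySem.List.pyGetD xs (i : Int) ""
  if PySem.Str.isIn "TER" line then
    let e := (i : Int)
    (s.1 ++ [PySem.List.slice xs (some s.2.1) (some e)], e + 1, e)
  else s

def stepB (s : List (List String) × List String) (line : String) :
    List (List String) × List String :=
  if PySem.Str.isIn "TER" line then (s.1 ++ [s.2], [])
  else (s.1, s.2 ++ [line])

lemma main_inv (xs : List String) :
    ∀ (rest : List String) (k st : Nat) (acc : List (List String)) (e : Int),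
      st ≤ k → xs.drop k = rest →
      ((List.range' k rest.length).foldl (stepA xs) (acc, (st : Int), e)).1
        = (rest.foldl stepB (acc, (xs.drop st).take (k - st))).1 := by
  intro rest
  induction rest with
  | nil => intro k st acc e _ _; simp
  | cons line tl ih =>
    intro k st acc e hle hdrop
    have hk : k < xs.length := by
      by_contra h
      have : xs.drop k = [] := List.drop_eq_nil_of_le (by omega)
      rw [this] at hdrop; exact (List.cons_ne_nil _ _) hdrop.symm
    have hline : xs[k] = line := by
      have := congrArg (fun l => l.head?) hdrop
      simpa [List.head?_drop, List.getElem?_eq_getElem hk] using this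
    have hget : PySem.List.pyGetD xs (k : Int) "" = line := by
      rw [PySem.List.pyGetD_natCast]
      simp [List.getD, List.getElem?_eq_getElem hk, hline]
    have htl : xs.drop (k + 1) = tl := by
      have := congrArg List.tail hdrop
      simpa [List.tail_drop] using this
    show ((List.range' k (tl.length + 1)).foldl (stepA xs) (acc, (st : Int), e)).1 = _
    rw [List.range'_succ, List.foldl_cons, List.foldl_cons]
    by_cases hTER : PySem.Str.isIn "TER" line = true
    · have hslice : PySem.List.slice xs (some (st : Int)) (some (k : Int))
          = (xs.drop st).take (k - st) := PySem.List.slice_natCast xs st k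
      have hA : stepA xs (acc, (st : Int), e) k
          = (acc ++ [(xs.drop st).take (k - st)], ((k : Int) + 1), (k : Int)) := by
        simp only [stepA]; rw [hget, hTER, hslice]; simp
      have hB : stepB (acc, (xs.drop st).take (k - st)) line
          = (acc ++ [(xs.drop st).take (k - st)], []) := by
        simp only [stepB]; rw [hTER]; simp
      rw [hA, hB]
      have : ((k : Int) + 1) = (((k + 1 : Nat)) : Int) := by push_cast; ring
      rw [this]
      have := ih (k + 1) (k + 1) (acc ++ [(xs.drop st).take (k - st)]) (k : Int)
        (le_refl _) htl
      simpa using this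
    · have hTER' : PySem.Str.isIn "TER" line = false := by
        revert hTER; cases PySem.Str.isIn "TER" line <;> simp
      have hA : stepA xs (acc, (st : Int), e) k = (acc, (st : Int), e) := by
        simp only [stepA]; rw [hget, hTER']; simp
      have hB : stepB (acc, (xs.drop st).take (k - st)) line
          = (acc, (xs.drop st).take (k - st) ++ [line]) := by
        simp only [stepB]; rw [hTER']; simp
      have hlen : k - st < (xs.drop st).length := by
        rw [List.length_drop]; omega
      have hgetd : (xs.drop st)[k - st]? = some line := by
        simp [List.getElem?_eq_getElem hlen, List.getElem_drop,
          show st + (k - st) = k from by omega, hline]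
      have hbuf : (xs.drop st).take (k - st) ++ [line] = (xs.drop st).take (k + 1 - st) := by
        rw [show k + 1 - st = (k - st) + 1 by omega, List.take_add_one, hgetd]
        simp
      rw [hA, hB, hbuf]
      exact ih (k + 1) st acc e (by omega) htl

-- ===== VERDICT (by name: the statement is the Claim_ definition above) =====
theorem getPDBChainList_spec : Claim_equal_getPDBChainList := by
  intro xs _
  show getPDBChainList xs = getPDBChainList_alt xs
  unfold getPDBChainList getPDBChainList_alt
  show ((List.range xs.length).foldl (stepA xs) ([], 0, -1)).1
      = (xs.foldl stepB ([], [])).1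
  rw [List.range_eq_range']
  exact main_inv xs xs 0 0 [] (-1) (le_refl 0) rfl
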